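-- pv_equiv track=rewrite | github.com/zorell11/python-academy | 7. Function Scopes & Inputs/Home exercisses/anagram.py | all_anagrams
-- ===== SOURCE A (Python) =====
-- def all_anagrams(list):
--     if not list:
--         return False
--     elif len(list) == 1:
--         return True
--     else:
--         for word in list[1:]:
--             for letter in list[0]:
--                 if letter not in word:
--                     return False
--         return True
-- ===== SOURCE B (Python) =====
-- def _covers(required, words):
--     if not words:
--         return True
--     return required <= set(words[0]) and _covers(required, words[1:])
--
--
-- def all_anagrams(list):
--     if not list:
--         return False
--     return _covers(set(list[0]), list[1:])
-- ===== Notes on version B (the rewrite author's own statement) =====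
-- stated objective: simpler
-- what changed: B replaces A's two guards plus nested per-letter loops by a single empty guard, deduplicating the first word into one required set and recursing over the remaining words with a per-word subset test (the length-1 case is the recursion's trivial base).
import Mathlib
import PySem

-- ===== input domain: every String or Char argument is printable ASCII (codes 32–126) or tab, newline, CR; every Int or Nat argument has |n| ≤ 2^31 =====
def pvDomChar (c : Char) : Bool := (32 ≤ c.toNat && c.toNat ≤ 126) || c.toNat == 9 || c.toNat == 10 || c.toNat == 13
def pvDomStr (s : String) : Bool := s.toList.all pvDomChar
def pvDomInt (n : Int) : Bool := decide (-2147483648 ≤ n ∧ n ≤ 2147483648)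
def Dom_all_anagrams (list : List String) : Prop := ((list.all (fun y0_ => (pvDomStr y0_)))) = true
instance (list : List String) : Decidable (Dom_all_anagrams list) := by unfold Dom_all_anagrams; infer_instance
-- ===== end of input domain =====

-- B drops A's length-1 guard and nested per-letter word scans: it deduplicates the
-- first word into one required set and recurses over the rest with a per-word subset
-- test (simpler decomposition, same result).
-- ===== PORT A =====
def all_anagrams (list : List String) : Bool :=
  if list = [] then false
  else if list.length == 1 then true
  else
    -- for word in list[1:]: for letter in list[0]: if letter not in word: return False
    (PySem.List.slice list (some 1) none).all (fun word =>
      (PySem.List.pyGetD list 0 "").toList.all (fun letter => word.toList.contains letter))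

-- ===== PORT B =====
-- _covers(required, words): required <= set(words[0]) and _covers(required, words[1:])
def covers (required : PySem.Set Char) (words : List String) : Bool :=
  match words with
  | [] => true
  | w :: ws => PySem.Set.issubset required (PySem.Set.ofList w.toList) && covers required ws

def all_anagrams_alt (list : List String) : Bool :=
  match list with
  | [] => false
  | first :: rest => covers (PySem.Set.ofList first.toList) rest

-- ===== PRECONDITION & SPEC =====
def Spec_all_anagrams (list : List String) (out : Bool) : Prop := out = all_anagrams_alt list
instance (list : List String) (out : Bool) : Decidable (Spec_all_anagrams list out) := by unfold Spec_all_anagrams; infer_instance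

-- ===== CLAIM (what is proved, stated in full; the proofs are below) =====
def Claim_equal_all_anagrams : Prop := ∀ (list : List String), Dom_all_anagrams list → Spec_all_anagrams list (all_anagrams list)

-- ===== LEMMAS AND PROOFS =====

theorem covers_eq (s : List Char) (ws : List String) :
    covers (PySem.Set.ofList s) ws
      = ws.all (fun w => s.all (fun letter => w.toList.contains letter)) := by
  induction ws with
  | nil => rfl
  | cons w rest ih =>
      simp only [covers, List.all_cons, ih, PySem.Set.issubset]
      rw [Bool.eq_iff_iff]
      simp [List.all_eq_true, PySem.Set.mem_ofList]

-- ===== VERDICT (by name: the statement is the Claim_ definition above) =====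
theorem all_anagrams_spec : Claim_equal_all_anagrams := by
  intro list _
  unfold Spec_all_anagrams all_anagrams all_anagrams_alt
  match list with
  | [] => rfl
  | [a] => simp [covers]
  | a :: b :: rest =>
      rw [if_neg (show ¬ (a :: b :: rest = ([]:List String)) by simp),
          if_neg (show ¬ (((a :: b :: rest).length == 1) = true) by simp),
          show PySem.List.slice (a :: b :: rest) (some 1) none = b :: rest from by simp [pysem],
          show PySem.List.pyGetD (a :: b :: rest) 0 "" = a from by simp [pysem]]
      exact (covers_eq a.toList (b :: rest)).symm
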